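-- pv_equiv track=rewrite | github.com/shreya2526/College-Training | code/coding cheet sheet/prog30.py | checkSuperior
-- ===== SOURCE A (Python) =====
-- def checkSuperior(arr, n):
--     count=1
--     max_right=arr[-1]
--
--     for i in range(n-2, -1, -1):
--         if(arr[i]>max_right):
--             count+=1
--             max_right=arr[i]
--
--     return count
-- ===== SOURCE B (Python) =====
-- def _prefix_maxes(xs, m):
--     # running maxima: element k is the max of m and xs[:k]
--     out = []
--     for x in xs:
--         out.append(m)
--         m = max(m, x)
--     return out
--
-- def checkSuperior(arr, n):
--     last = arr[-1]
--     seg = arr[:n-1] if n >= 1 else []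
--     rev = seg[::-1]
--     sufs = _prefix_maxes(rev, last)
--     return 1 + sum(1 for x, s in zip(rev, sufs) if x > s)
-- ===== Notes on version B (the rewrite author's own statement) =====
-- stated objective: alternative
-- what changed: Replaces the single index loop carrying a (count, running-max) pair with a two-phase decomposition: build the list of running maxima over the reversed prefix arr[:n-1] anchored at arr[-1], then count positions whose value strictly exceeds their suffix maximum via zip.
import Mathlib
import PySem

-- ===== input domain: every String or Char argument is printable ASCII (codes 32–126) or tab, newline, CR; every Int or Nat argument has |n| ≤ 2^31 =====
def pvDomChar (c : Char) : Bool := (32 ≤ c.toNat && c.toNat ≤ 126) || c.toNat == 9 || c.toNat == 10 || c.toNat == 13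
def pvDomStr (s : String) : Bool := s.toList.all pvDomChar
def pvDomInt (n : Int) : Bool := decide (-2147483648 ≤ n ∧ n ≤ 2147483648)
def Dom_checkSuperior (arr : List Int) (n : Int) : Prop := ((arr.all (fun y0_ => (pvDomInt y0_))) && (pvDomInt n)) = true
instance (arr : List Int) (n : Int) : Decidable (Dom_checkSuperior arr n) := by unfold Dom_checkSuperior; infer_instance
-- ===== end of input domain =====

-- B replaces A's single index loop carrying (count, running-max) with a two-phase
-- decomposition: build the running-maxima list of the reversed prefix, then count by zip.

-- ===== PORT A =====
def checkSuperior (arr : List Int) (n : Int) : Int :=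
  -- max_right = arr[-1]; Pre_ guarantees arr ≠ [] so the default 0 is never used
  let max0 := (PySem.List.pyGet? arr (-1)).getD 0
  -- for i in range(n-2, -1, -1): if arr[i] > max_right: count += 1; max_right = arr[i]
  -- Pre_ guarantees every index is in range, so pyGetD's default 0 is never used
  ((PySem.List.pyRange (n - 2) (-1) (-1)).foldl
    (fun (s : Int × Int) i =>
      if PySem.List.pyGetD arr i 0 > s.2 then (s.1 + 1, PySem.List.pyGetD arr i 0) else s)
    (1, max0)).1

-- ===== PORT B =====
-- _prefix_maxes(xs, m): loop appending the running max so far; element k is max of m and xs[:k]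
def prefixMaxes (xs : List Int) (m : Int) : List Int :=
  (xs.foldl (fun (s : List Int × Int) x => (s.1 ++ [s.2], max s.2 x)) ([], m)).1

def checkSuperior_alt (arr : List Int) (n : Int) : Int :=
  let last := (PySem.List.pyGet? arr (-1)).getD 0   -- Pre_: arr ≠ []
  let seg := if 1 ≤ n then PySem.List.slice arr none (some (n - 1)) else []
  let rev := seg.reverse
  let sufs := prefixMaxes rev last
  1 + ((rev.zip sufs).countP (fun p => decide (p.2 < p.1)) : Int)

-- ===== PRECONDITION & SPEC =====
-- Pre_ excludes exactly the inputs on which A raises IndexError: empty arr (arr[-1])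
-- and n > len(arr) + 1 (arr[n-2] out of range).
def Pre_checkSuperior (arr : List Int) (n : Int) : Prop :=
  arr ≠ [] ∧ n ≤ (arr.length : Int) + 1
instance (arr : List Int) (n : Int) : Decidable (Pre_checkSuperior arr n) := by
  unfold Pre_checkSuperior; infer_instance
def pvWitness_checkSuperior : List Int × Int := ([3, 1, 2], 3)
def Spec_checkSuperior (arr : List Int) (n : Int) (out : Int) : Prop := out = checkSuperior_alt arr n
instance (arr : List Int) (n : Int) (out : Int) : Decidable (Spec_checkSuperior arr n out) := by unfold Spec_checkSuperior; infer_instance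

-- ===== CLAIM (what is proved, stated in full; the proofs are below) =====
def Claim_equal_checkSuperior : Prop := ∀ (arr : List Int) (n : Int), Dom_checkSuperior arr n → Pre_checkSuperior arr n → Spec_checkSuperior arr n (checkSuperior arr n)

-- ===== LEMMAS AND PROOFS =====


-- recursive characterisation of prefixMaxes (proof helper)
def prefixMaxesRec : List Int → Int → List Int
  | [], _ => []
  | x :: xs, m => m :: prefixMaxesRec xs (max m x)

theorem prefixMaxes_fold_acc (xs : List Int) (acc : List Int) (m : Int) :
    (xs.foldl (fun (s : List Int × Int) x => (s.1 ++ [s.2], max s.2 x)) (acc, m)).1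
      = acc ++ prefixMaxesRec xs m := by
  induction xs generalizing acc m with
  | nil => simp [prefixMaxesRec]
  | cons x xs ih => simp [prefixMaxesRec, ih]

theorem prefixMaxes_eq_rec (xs : List Int) (m : Int) :
    prefixMaxes xs m = prefixMaxesRec xs m := by
  unfold prefixMaxes
  rw [prefixMaxes_fold_acc]
  simp

-- core: A's fold over values = c + B's zip count, for any anchor m
theorem fold_eq_zipcount (l : List Int) (m c : Int) :
    (l.foldl (fun (s : Int × Int) x => if x > s.2 then (s.1 + 1, x) else s) (c, m)).1
      = c + ((l.zip (prefixMaxesRec l m)).countP (fun p => decide (p.2 < p.1)) : Int) := by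
  induction l generalizing m c with
  | nil => simp [prefixMaxesRec]
  | cons x xs ih =>
    rw [List.foldl_cons]
    by_cases h : m < x
    · rw [if_pos h, ih x (c + 1)]
      have hmax : max m x = x := max_eq_right h.le
      simp [prefixMaxesRec, hmax, h]
      ring
    · rw [if_neg h, ih m c]
      have hmax : max m x = m := max_eq_left (le_of_not_gt h)
      simp [prefixMaxesRec, hmax, h]

-- A's countdown index fold over range(k-1, -1, -1) = value fold over (take k).reverse
theorem fold_range_eq_fold_take (arr : List Int) (f : Int × Int → Int → Int × Int)
    (k : Nat) (init : Int × Int) (hk : k ≤ arr.length) :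
    (PySem.List.pyRange ((k : Int) - 1) (-1) (-1)).foldl
        (fun s i => f s (PySem.List.pyGetD arr i 0)) init
      = (arr.take k).reverse.foldl f init := by
  induction k generalizing init with
  | zero =>
    rw [PySem.List.pyRange_neg_one_eq_nil (by omega)]
    simp
  | succ k ih =>
    have hklt : k < arr.length := by omega
    have ha : ((k + 1 : Nat) : Int) - 1 = (k : Int) := by push_cast; ring
    rw [ha, PySem.List.pyRange_neg_one_cons (by omega : (-1 : Int) < (k : Int)),
        List.foldl_cons]
    have hget : PySem.List.pyGetD arr (k : Int) 0 = arr[k] := by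
      rw [PySem.List.pyGetD_eq_getElem arr 0 (by omega) (by exact_mod_cast hklt)]
      simp
    rw [hget, List.take_add_one, List.getElem?_eq_getElem hklt]
    simp only [Option.toList_some, List.reverse_append, List.reverse_singleton,
      List.singleton_append, List.foldl_cons]
    exact ih _ (by omega)

-- ===== VERDICT (by name: the statement is the Claim_ definition above) =====
theorem checkSuperior_spec : Claim_equal_checkSuperior := by
  intro arr n _ hpre
  obtain ⟨hne, hle⟩ := hpre
  unfold Spec_checkSuperior checkSuperior checkSuperior_alt
  dsimp only
  by_cases h1 : 1 ≤ n
  · rw [if_pos h1]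
    have hb : (0 : Int) ≤ n - 1 := by omega
    rw [PySem.List.slice_to arr hb]
    set k : Nat := (n - 1).toNat with hkdef
    have hk : k ≤ arr.length := by omega
    have hn2 : n - 2 = (k : Int) - 1 := by omega
    rw [hn2, fold_range_eq_fold_take arr (fun (s : Int × Int) v => if v > s.2 then (s.1 + 1, v) else s) k _ hk,
        prefixMaxes_eq_rec,
        fold_eq_zipcount ((arr.take k).reverse) ((PySem.List.pyGet? arr (-1)).getD 0) 1]
  · rw [if_neg h1]
    rw [PySem.List.pyRange_neg_one_eq_nil (by omega)]
    simp [prefixMaxes]
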